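-- pv_equiv track=rewrite | github.com/uiandwe/TIL | algorithm/backjoon/37.etc/10809/acmicpc11723/11723.py | solution
-- ===== SOURCE A (Python) =====
-- def solution(arr):
--     d = [0 for x in range(21)]
--     ret_arr = []
--     for op in arr:
--         if op[0] == "add":
--             d[op[1]] = 1
--         elif op[0] == "check":
--             ret_arr.append(d[op[1]])
--         elif op[0] == "remove":
--             d[op[1]] = 0
--         elif op[0] == "toggle":
--             d[op[1]] ^= 1
--         elif op[0] == "all":
--             for i in range(len(d)):
--                 d[i] = 1
--         elif op[0] == "empty":
--             for i in range(len(d)):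
--                 d[i] = 0
--
--     return ret_arr
-- ===== SOURCE B (Python) =====
-- def _lookup(history, i):
--     # Value of bit i given the earlier operations, most recent first:
--     # count intervening toggles of i until the last op that fixed the bit.
--     toggles = 0
--     for o, j in history:
--         if o == "toggle" and j == i:
--             toggles += 1
--         elif o == "all" or (o == "add" and j == i):
--             return (toggles + 1) % 2
--         elif o == "empty" or (o == "remove" and j == i):
--             return toggles % 2
--     return toggles % 2
--
-- def solution(arr):
--     out = []
--     history = []  # operations seen so far, most recent first
--     for op, i in arr:
--         if op == "check":
--             out.append(_lookup(history, i))
--         history.insert(0, (op, i))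
--     return out
-- ===== Notes on version B (the rewrite author's own statement) =====
-- stated objective: alternative
-- what changed: Drops A's mutated 21-cell array entirely: B keeps only the raw operation history and answers each 'check' by a backward scan over the preceding ops, counting toggles of that index until the most recent add/remove/all/empty that fixed the bit.
-- outside the precondition, e.g. on solution([('add', -1), ('check', 20)]): A returns [1], B returns [0]; on solution([('add', 30)]): A raises IndexError, B returns []
import Mathlib
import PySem

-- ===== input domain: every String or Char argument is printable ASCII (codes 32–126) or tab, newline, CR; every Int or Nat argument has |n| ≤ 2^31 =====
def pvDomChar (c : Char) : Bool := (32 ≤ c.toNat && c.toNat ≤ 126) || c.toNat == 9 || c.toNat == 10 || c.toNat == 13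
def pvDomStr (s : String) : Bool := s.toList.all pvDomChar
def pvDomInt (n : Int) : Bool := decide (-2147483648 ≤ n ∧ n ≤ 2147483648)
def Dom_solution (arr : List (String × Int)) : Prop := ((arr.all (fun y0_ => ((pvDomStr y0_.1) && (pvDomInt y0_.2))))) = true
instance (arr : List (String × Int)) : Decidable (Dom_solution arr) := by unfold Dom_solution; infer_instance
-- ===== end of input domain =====

-- B drops A's mutated 21-cell array: each 'check' is answered by a backward scan of the operation history (alternative algorithm, not faster).


-- ===== PORT A =====
-- d[i] = v with Python's negative-index wraparound; where Python raises IndexError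
-- (index out of range) the state is returned unchanged — those inputs are outside Pre_solution.
def pySetAt (d : List Int) (i v : Int) : List Int :=
  match PySem.List.pyIdx? d.length i with
  | some j => d.set j v
  | none => d

def solutionStepA (st : List Int × List Int) (op : String × Int) : List Int × List Int :=
  if op.1 = "add" then (pySetAt st.1 op.2 1, st.2)
  else if op.1 = "check" then (st.1, st.2 ++ [(PySem.List.pyGet? st.1 op.2).getD 0])
  else if op.1 = "remove" then (pySetAt st.1 op.2 0, st.2)
  else if op.1 = "toggle" then
    (pySetAt st.1 op.2 (PySem.Int.bxor ((PySem.List.pyGet? st.1 op.2).getD 0) 1), st.2)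
  else if op.1 = "all" then
    ((PySem.List.pyRange 0 ((st.1.length : Int)) 1).foldl (fun dd i => pySetAt dd i 1) st.1, st.2)
  else if op.1 = "empty" then
    ((PySem.List.pyRange 0 ((st.1.length : Int)) 1).foldl (fun dd i => pySetAt dd i 0) st.1, st.2)
  else st

def solution (arr : List (String × Int)) : List Int :=
  (arr.foldl solutionStepA (List.replicate 21 0, [])).2

-- ===== PORT B =====
-- _lookup: backward scan over the history (most recent op first), counting toggles of i
-- until the most recent op that fixed bit i.
def lookupB : List (String × Int) → Int → Nat → Int
  | [], _, t => ((t % 2 : Nat) : Int)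
  | (o, j) :: rest, i, t =>
    if o = "toggle" ∧ j = i then lookupB rest i (t + 1)
    else if o = "all" ∨ (o = "add" ∧ j = i) then (((t + 1) % 2 : Nat) : Int)
    else if o = "empty" ∨ (o = "remove" ∧ j = i) then ((t % 2 : Nat) : Int)
    else lookupB rest i t

-- the loop state (out, history); history.insert(0, op) is op :: history
def solutionStepB (st : List Int × List (String × Int)) (op : String × Int) :
    List Int × List (String × Int) :=
  ((if op.1 = "check" then st.1 ++ [lookupB st.2 op.2 0] else st.1), op :: st.2)

def solution_alt (arr : List (String × Int)) : List Int :=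
  (arr.foldl solutionStepB ([], [])).1

-- ===== PRECONDITION & SPEC =====
-- Pre_ restricts to the task's natural domain: every add/check/remove/toggle carries an index
-- in 0..20 (the 21-cell set). Outside it A raises IndexError for indices < -21 or > 20, and
-- for -21..-1 A returns via Python's negative-index wraparound into cells 20..0 — behaviour
-- outside the problem's stated domain that B's plain index comparison does not mirror.
def Pre_solution (arr : List (String × Int)) : Prop :=
  ∀ p ∈ arr, (p.1 = "add" ∨ p.1 = "check" ∨ p.1 = "remove" ∨ p.1 = "toggle") →
    0 ≤ p.2 ∧ p.2 < 21
instance (arr : List (String × Int)) : Decidable (Pre_solution arr) := by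
  unfold Pre_solution; infer_instance
def pvWitness_solution : (List (String × Int)) :=
  [("add", 3), ("check", 3), ("toggle", 3), ("check", 3), ("all", 0), ("check", 20), ("empty", 0), ("check", 0)]

def Spec_solution (arr : List (String × Int)) (out : List Int) : Prop := out = solution_alt arr
instance (arr : List (String × Int)) (out : List Int) : Decidable (Spec_solution arr out) := by
  unfold Spec_solution; infer_instance

-- ===== CLAIM (what is proved, stated in full; the proofs are below) =====
def Claim_equal_solution : Prop :=
  ∀ (arr : List (String × Int)), Dom_solution arr → Pre_solution arr → Spec_solution arr (solution arr)

-- ===== LEMMAS AND PROOFS =====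

theorem pySetAt_of_lt (d : List Int) (i v : Int) (h0 : 0 ≤ i) (h1 : i < d.length) :
    pySetAt d i v = d.set i.toNat v := by
  simp [pySetAt, PySem.List.pyIdx?, h0, h1]

theorem getD_set_21 (d : List Int) (k j : Nat) (v : Int) (hk : k < d.length) :
    (d.set k v).getD j 0 = if k = j then v else d.getD j 0 := by
  simp only [List.getD_eq_getElem?_getD, List.getElem?_set]
  split <;> rfl

theorem foldl_setAt_range (v : Int) :
    ∀ (n : Nat) (d : List Int), n ≤ d.length →
      (((List.range n).map Int.ofNat).foldl (fun dd i => pySetAt dd i v) d).length = d.length ∧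
      ∀ j : Nat, (((List.range n).map Int.ofNat).foldl (fun dd i => pySetAt dd i v) d).getD j 0
        = if j < n then v else d.getD j 0 := by
  intro n
  induction n with
  | zero => intro d _; simp
  | succ n ih =>
    intro d hn
    have hn' : n ≤ d.length := by omega
    obtain ⟨hlen, hget⟩ := ih d hn'
    rw [List.range_succ, List.map_append, List.foldl_append]
    simp only [List.map_cons, List.map_nil, List.foldl_cons, List.foldl_nil, Int.ofNat_eq_natCast]
    have hset : pySetAt (((List.range n).map Int.ofNat).foldl (fun dd i => pySetAt dd i v) d) (n:Int) v
        = (((List.range n).map Int.ofNat).foldl (fun dd i => pySetAt dd i v) d).set n v := by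
      rw [pySetAt_of_lt _ _ _ (by positivity) (by rw [hlen]; exact_mod_cast (by omega : (n:Int) < (d.length:Int)))]
      simp
    rw [hset]
    refine ⟨by simp [hlen], ?_⟩
    intro j
    rw [getD_set_21 _ _ _ _ (by omega), hget]
    by_cases hj : n = j
    · subst hj; simp
    · rw [if_neg hj]
      by_cases h2 : j < n
      · rw [if_pos h2, if_pos (by omega)]
      · rw [if_neg h2, if_neg (by omega)]

theorem pyGet_getD (d : List Int) (i : Int) (h0 : 0 ≤ i) (h1 : i < d.length) :
    (PySem.List.pyGet? d i).getD 0 = d.getD i.toNat 0 := by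
  simp [PySem.List.pyGet?, PySem.List.pyIdx?, h0, h1, List.getD_eq_getElem?_getD]

theorem pyRange21 : PySem.List.pyRange 0 (21:Int) 1 = (List.range 21).map Int.ofNat := by decide

-- lookupB's value is a bit, and bumping the toggle accumulator flips it
theorem lookupB_flip : ∀ (hist : List (String × Int)) (i : Int) (t : Nat),
    (lookupB hist i t = 0 ∨ lookupB hist i t = 1) ∧
    lookupB hist i (t + 1) = 1 - lookupB hist i t := by
  intro hist
  induction hist with
  | nil =>
    intro i t
    simp only [lookupB]
    rcases Nat.mod_two_eq_zero_or_one t with h | h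
    · refine ⟨Or.inl (by simp [h]), ?_⟩
      have h2 : (t + 1) % 2 = 1 := by omega
      rw [h, h2]; simp
    · refine ⟨Or.inr (by simp [h]), ?_⟩
      have h2 : (t + 1) % 2 = 0 := by omega
      rw [h, h2]; simp
  | cons op rest ih =>
    intro i t
    obtain ⟨o, j⟩ := op
    simp only [lookupB]
    split_ifs with h1 h2 h3
    · exact ⟨(ih i (t + 1)).1, by rw [(ih i (t + 1)).2]⟩
    · rcases Nat.mod_two_eq_zero_or_one t with h | h
      · have h2 : (t + 1) % 2 = 1 := by omega
        have h3 : (t + 1 + 1) % 2 = 0 := by omega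
        exact ⟨Or.inr (by simp [h2]), by rw [h2, h3]; simp⟩
      · have h2 : (t + 1) % 2 = 0 := by omega
        have h3 : (t + 1 + 1) % 2 = 1 := by omega
        exact ⟨Or.inl (by simp [h2]), by rw [h2, h3]; simp⟩
    · rcases Nat.mod_two_eq_zero_or_one t with h | h
      · have h2 : (t + 1) % 2 = 1 := by omega
        exact ⟨Or.inl (by simp [h]), by rw [h, h2]; simp⟩
      · have h2 : (t + 1) % 2 = 0 := by omega
        exact ⟨Or.inr (by simp [h]), by rw [h, h2]; simp⟩
    · exact ih i t

theorem lookupB_skip (o : String) (j i : Int) (hist : List (String × Int)) (t : Nat)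
    (h1 : ¬(o = "toggle" ∧ j = i)) (h2 : ¬(o = "all" ∨ (o = "add" ∧ j = i)))
    (h3 : ¬(o = "empty" ∨ (o = "remove" ∧ j = i))) :
    lookupB ((o, j) :: hist) i t = lookupB hist i t := by
  simp only [lookupB, if_neg h1, if_neg h2, if_neg h3]

theorem loop_lemma (rest : List (String × Int)) :
    ∀ (d out : List Int) (hist : List (String × Int)),
      (∀ p ∈ rest, (p.1 = "add" ∨ p.1 = "check" ∨ p.1 = "remove" ∨ p.1 = "toggle") → 0 ≤ p.2 ∧ p.2 < 21) →
      d.length = 21 →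
      (∀ i : Int, 0 ≤ i → i < 21 → d.getD i.toNat 0 = lookupB hist i 0) →
      (rest.foldl solutionStepA (d, out)).2 = (rest.foldl solutionStepB (out, hist)).1 := by
  induction rest with
  | nil => intro d out hist _ _ _; rfl
  | cons op tl ih =>
    intro d out hist hpre hlen hinv
    have hpre' : ∀ p ∈ tl, (p.1 = "add" ∨ p.1 = "check" ∨ p.1 = "remove" ∨ p.1 = "toggle") → 0 ≤ p.2 ∧ p.2 < 21 :=
      fun p hp => hpre p (List.mem_cons_of_mem _ hp)
    obtain ⟨o, j⟩ := op
    simp only [List.foldl_cons]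
    by_cases hadd : o = "add"
    · have hb := hpre (o, j) List.mem_cons_self (Or.inl hadd)
      have hA : solutionStepA (d, out) (o, j) = (pySetAt d j 1, out) := by
        simp [solutionStepA, hadd]
      have hB : solutionStepB (out, hist) (o, j) = (out, (o, j) :: hist) := by
        simp [solutionStepB, hadd]
      rw [hA, hB, pySetAt_of_lt d j 1 hb.1 (by omega)]
      refine ih _ _ _ hpre' (by simp [hlen]) ?_
      intro i h0 h1
      rw [getD_set_21 d j.toNat i.toNat 1 (by omega)]
      by_cases hji : j = i
      · rw [if_pos (by rw [hji]), hji]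
        simp [lookupB, hadd]
      · rw [if_neg (by omega), hinv i h0 h1,
          lookupB_skip o j i hist 0 (by simp [hadd]) (by simp [hadd, hji]) (by simp [hadd])]
    · by_cases hcheck : o = "check"
      · have hb := hpre (o, j) List.mem_cons_self (Or.inr (Or.inl hcheck))
        have hA : solutionStepA (d, out) (o, j) = (d, out ++ [(PySem.List.pyGet? d j).getD 0]) := by
          simp [solutionStepA, hcheck]
        have hB : solutionStepB (out, hist) (o, j) = (out ++ [lookupB hist j 0], (o, j) :: hist) := by
          simp [solutionStepB, hcheck]
        rw [hA, hB, pyGet_getD d j hb.1 (by omega), hinv j hb.1 hb.2]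
        refine ih _ _ _ hpre' hlen ?_
        intro i h0 h1
        rw [hinv i h0 h1,
          lookupB_skip o j i hist 0 (by simp [hcheck]) (by simp [hcheck]) (by simp [hcheck])]
      · by_cases hremove : o = "remove"
        · have hb := hpre (o, j) List.mem_cons_self (Or.inr (Or.inr (Or.inl hremove)))
          have hA : solutionStepA (d, out) (o, j) = (pySetAt d j 0, out) := by
            simp [solutionStepA, hremove]
          have hB : solutionStepB (out, hist) (o, j) = (out, (o, j) :: hist) := by
            simp [solutionStepB, hremove]
          rw [hA, hB, pySetAt_of_lt d j 0 hb.1 (by omega)]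
          refine ih _ _ _ hpre' (by simp [hlen]) ?_
          intro i h0 h1
          rw [getD_set_21 d j.toNat i.toNat 0 (by omega)]
          by_cases hji : j = i
          · rw [if_pos (by rw [hji]), hji]
            simp [lookupB, hremove]
          · rw [if_neg (by omega), hinv i h0 h1,
              lookupB_skip o j i hist 0 (by simp [hremove]) (by simp [hremove]) (by simp [hremove, hji])]
        · by_cases htoggle : o = "toggle"
          · have hb := hpre (o, j) List.mem_cons_self (Or.inr (Or.inr (Or.inr htoggle)))
            have hA : solutionStepA (d, out) (o, j)
                = (pySetAt d j (PySem.Int.bxor ((PySem.List.pyGet? d j).getD 0) 1), out) := by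
              simp [solutionStepA, htoggle]
            have hB : solutionStepB (out, hist) (o, j) = (out, (o, j) :: hist) := by
              simp [solutionStepB, htoggle]
            rw [hA, hB, pyGet_getD d j hb.1 (by omega), hinv j hb.1 hb.2,
              pySetAt_of_lt d j _ hb.1 (by omega)]
            refine ih _ _ _ hpre' (by simp [hlen]) ?_
            intro i h0 h1
            rw [getD_set_21 d j.toNat i.toNat _ (by omega)]
            by_cases hji : j = i
            · subst hji
              rw [if_pos rfl]
              have hcons : lookupB ((o, j) :: hist) j 0 = lookupB hist j 1 := by
                simp [lookupB, htoggle]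
              rw [hcons, (lookupB_flip hist j 0).2]
              rcases (lookupB_flip hist j 0).1 with h | h <;> rw [h] <;> decide
            · rw [if_neg (by omega), hinv i h0 h1,
                lookupB_skip o j i hist 0 (by simp [hji]) (by simp [htoggle]) (by simp [htoggle])]
          · by_cases hall : o = "all"
            · have hA : solutionStepA (d, out) (o, j)
                  = ((PySem.List.pyRange 0 ((d.length : Int)) 1).foldl (fun dd i => pySetAt dd i 1) d, out) := by
                simp [solutionStepA, hall]
              have hB : solutionStepB (out, hist) (o, j) = (out, (o, j) :: hist) := by
                simp [solutionStepB, hall]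
              rw [hA, hB, hlen]
              rw [show ((21 : Nat) : Int) = (21 : Int) from rfl, pyRange21]
              obtain ⟨hl2, hg2⟩ := foldl_setAt_range 1 21 d (by omega)
              refine ih _ _ _ hpre' (by rw [hl2, hlen]) ?_
              intro i h0 h1
              rw [hg2 i.toNat, if_pos (by omega)]
              simp [lookupB, hall]
            · by_cases hempty : o = "empty"
              · have hA : solutionStepA (d, out) (o, j)
                    = ((PySem.List.pyRange 0 ((d.length : Int)) 1).foldl (fun dd i => pySetAt dd i 0) d, out) := by
                  simp [solutionStepA, hempty]
                have hB : solutionStepB (out, hist) (o, j) = (out, (o, j) :: hist) := by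
                  simp [solutionStepB, hempty]
                rw [hA, hB, hlen]
                rw [show ((21 : Nat) : Int) = (21 : Int) from rfl, pyRange21]
                obtain ⟨hl2, hg2⟩ := foldl_setAt_range 0 21 d (by omega)
                refine ih _ _ _ hpre' (by rw [hl2, hlen]) ?_
                intro i h0 h1
                rw [hg2 i.toNat, if_pos (by omega)]
                simp [lookupB, hempty]
              · have hA : solutionStepA (d, out) (o, j) = (d, out) := by
                  simp [solutionStepA, hadd, hcheck, hremove, htoggle, hall, hempty]
                have hB : solutionStepB (out, hist) (o, j) = (out, (o, j) :: hist) := by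
                  simp [solutionStepB, hcheck]
                rw [hA, hB]
                refine ih _ _ _ hpre' hlen ?_
                intro i h0 h1
                rw [hinv i h0 h1,
                  lookupB_skip o j i hist 0 (by simp [htoggle]) (by simp [hall, hadd]) (by simp [hempty, hremove])]

-- ===== VERDICT (by name: the statement is the Claim_ definition above) =====
theorem solution_spec : Claim_equal_solution := by
  unfold Claim_equal_solution
  intro arr _ hpre
  unfold Spec_solution solution solution_alt
  refine loop_lemma arr (List.replicate 21 0) [] [] hpre (by decide) ?_
  intro i h0 h1
  have hlt : i.toNat < 21 := by omega
  rw [List.getD_eq_getElem?_getD, List.getElem?_replicate]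
  simp [lookupB, hlt]
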